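-- pv_equiv track=rewrite | github.com/romana/topowiz | topowiz/http.py | calculate_num_groups
-- ===== SOURCE A (Python) =====
-- def calculate_num_groups(conf, num_networks=None):
--     """
--     Calculates how many prefix groups we can have per zone. Takes into account
--     that we need a route for each prefix group and we can't have more than 48
--     route total.
--
--     """
--     num_zones  = len(conf['aws_zones'])
--     num_nets   = len(conf['networks']) if num_networks is None else \
--                                       num_networks
--     num_groups = 32
--
--     while num_groups * num_zones * num_nets > 48:
--         if num_groups == 1:
--             raise Exception("Too many networks and/or zones, reaching "
--                             "50 route limit for AWS.")
--         num_groups //= 2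
--     return num_groups
-- ===== SOURCE B (Python) =====
-- def calculate_num_groups(conf, num_networks=None):
--     num_zones = len(conf['aws_zones'])
--     num_nets = len(conf['networks']) if num_networks is None else num_networks
--     num = num_zones * num_nets
--     if num <= 1:
--         return 32
--     cap = 48 // num
--     if cap < 1:
--         raise Exception("Too many networks and/or zones, reaching "
--                         "50 route limit for AWS.")
--     return min(32, 1 << (cap.bit_length() - 1))
-- ===== Notes on version B (the rewrite author's own statement) =====
-- stated objective: simpler
-- what changed: Replaces A's while-loop that repeatedly halves num_groups from 32 with a direct closed-form computation: cap = 48 // num and the answer is min(32, 1 << (cap.bit_length() - 1)), with the num <= 1 case (including zero/negative products) returning 32 up front.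
import Mathlib
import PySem

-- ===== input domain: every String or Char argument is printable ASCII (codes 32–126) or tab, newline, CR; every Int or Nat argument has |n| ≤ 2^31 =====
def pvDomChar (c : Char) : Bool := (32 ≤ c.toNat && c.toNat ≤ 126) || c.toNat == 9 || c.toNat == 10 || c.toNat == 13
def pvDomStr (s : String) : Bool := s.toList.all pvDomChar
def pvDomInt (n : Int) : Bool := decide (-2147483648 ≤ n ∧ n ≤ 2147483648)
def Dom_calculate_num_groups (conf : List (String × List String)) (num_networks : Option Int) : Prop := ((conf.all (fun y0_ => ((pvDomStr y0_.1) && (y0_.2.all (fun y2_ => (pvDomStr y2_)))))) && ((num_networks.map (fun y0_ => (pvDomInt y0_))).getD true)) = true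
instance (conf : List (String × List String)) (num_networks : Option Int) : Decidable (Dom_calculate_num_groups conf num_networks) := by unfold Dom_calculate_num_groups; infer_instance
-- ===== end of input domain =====

-- B replaces A's halving while-loop by a closed-form bit-length computation (objective: simpler).


-- ===== PORT A =====
-- dict lookup conf[k]: first match in insertion order (none = KeyError, excluded by Pre_)
def pvKey (conf : List (String × List String)) (k : String) : Option (List String) :=
  List.lookup k conf

-- the 'while num_groups * num_zones * num_nets > 48' halving loop; fuel 7 covers the
-- at most 6 checks (g = 32,16,8,4,2,1); 0 stands for the raise / exhausted fuel, excluded by Pre_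
def pvLoopA (num : Int) (g : Int) : Nat → Int
  | 0 => 0
  | fuel+1 =>
    if g * num > 48 then
      if g = 1 then 0  -- raise Exception("Too many networks ...") — excluded by Pre_
      else pvLoopA num (PySem.Int.floordiv g 2) fuel
    else g

def calculate_num_groups (conf : List (String × List String)) (num_networks : Option Int) : Int :=
  match pvKey conf "aws_zones" with
  | none => 0  -- KeyError, excluded by Pre_
  | some zs =>
    let num_zones : Int := zs.length
    let num_nets : Int :=
      match num_networks with
      | some n => n
      | none =>
        match pvKey conf "networks" with
        | none => 0  -- KeyError, excluded by Pre_
        | some ns => ns.length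
    pvLoopA (num_zones * num_nets) 32 7

-- ===== PORT B =====
def calculate_num_groups_alt (conf : List (String × List String)) (num_networks : Option Int) : Int :=
  match List.lookup "aws_zones" conf with
  | none => 0  -- KeyError, excluded by Pre_
  | some zs =>
    let num_zones : Int := zs.length
    let num_nets : Int :=
      match num_networks with
      | some n => n
      | none =>
        match List.lookup "networks" conf with
        | none => 0  -- KeyError, excluded by Pre_
        | some ns => ns.length
    let num := num_zones * num_nets
    if num ≤ 1 then 32
    else
      let cap := PySem.Int.floordiv 48 num
      if cap < 1 then 0  -- raise Exception — excluded by Pre_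
      else min 32 ((2 : Int) ^ (PySem.Int.bitLength cap - 1))  -- 1 << (cap.bit_length() - 1)

-- ===== PRECONDITION & SPEC =====
-- Pre_ = exactly the inputs where Python A returns: both dict lookups succeed and the
-- zone/net product is ≤ 48 (otherwise A raises its 'Too many networks' Exception / KeyError).
def Pre_calculate_num_groups (conf : List (String × List String)) (num_networks : Option Int) : Prop :=
  (List.lookup "aws_zones" conf).isSome ∧
  (num_networks = none → (List.lookup "networks" conf).isSome) ∧
  (((List.lookup "aws_zones" conf).getD []).length : Int) *
    (match num_networks with
     | some n => n
     | none => (((List.lookup "networks" conf).getD []).length : Int)) ≤ 48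
instance (conf : List (String × List String)) (num_networks : Option Int) : Decidable (Pre_calculate_num_groups conf num_networks) := by unfold Pre_calculate_num_groups; infer_instance

def pvWitness_calculate_num_groups : (List (String × List String)) × Option Int :=
  ([("aws_zones", ["z1"]), ("networks", ["n1", "n2"])], none)

def Spec_calculate_num_groups (conf : List (String × List String)) (num_networks : Option Int) (out : Int) : Prop := out = calculate_num_groups_alt conf num_networks
instance (conf : List (String × List String)) (num_networks : Option Int) (out : Int) : Decidable (Spec_calculate_num_groups conf num_networks out) := by unfold Spec_calculate_num_groups; infer_instance

-- ===== CLAIM (what is proved, stated in full; the proofs are below) =====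
def Claim_equal_calculate_num_groups : Prop := ∀ (conf : List (String × List String)) (num_networks : Option Int), Dom_calculate_num_groups conf num_networks → Pre_calculate_num_groups conf num_networks → Spec_calculate_num_groups conf num_networks (calculate_num_groups conf num_networks)

-- ===== LEMMAS AND PROOFS =====
-- core numeric fact: for any product num ≤ 48, A's halving loop equals B's closed form
theorem pvLoop_eq_closed (num : Int) (h : num ≤ 48) :
    pvLoopA num 32 7 =
      (if num ≤ 1 then (32 : Int)
       else if PySem.Int.floordiv 48 num < 1 then 0
       else min 32 ((2 : Int) ^ (PySem.Int.bitLength (PySem.Int.floordiv 48 num) - 1))) := by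
  by_cases h1 : num ≤ 1
  · have : ¬ (32 * num > 48) := by omega
    simp [pvLoopA, this, h1]
  · have h2 : 2 ≤ num := by omega
    interval_cases num <;> decide

theorem calculate_num_groups_spec : Claim_equal_calculate_num_groups := by
  intro conf nn _ hpre
  obtain ⟨hz, hn, hnum⟩ := hpre
  unfold Spec_calculate_num_groups calculate_num_groups calculate_num_groups_alt pvKey
  cases hzs : List.lookup "aws_zones" conf with
  | none => simp [hzs] at hz
  | some zs =>
    simp only
    cases nn with
    | some n =>
      rw [hzs] at hnum
      simpa using pvLoop_eq_closed _ (by simpa using hnum)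
    | none =>
      cases hns : List.lookup "networks" conf with
      | none => simp [hns] at hn
      | some ns =>
        rw [hzs, hns] at hnum
        simpa using pvLoop_eq_closed _ (by simpa using hnum)
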